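-- pv_equiv track=rewrite | github.com/KU-MedAI/The-Dr.Emb-Appyter | utils_docker.py | find_duplicate_names
-- ===== SOURCE A (Python) =====
-- def find_duplicate_names(dictionary):
--     name_to_keys = {}
--
--     for key, value in dictionary.items():
--         for name in value:
--             if name in name_to_keys:
--                 name_to_keys[name].append(key)
--             else:
--                 name_to_keys[name] = [key]
--
--     result_dict = {name: keys for name, keys in name_to_keys.items() if len(keys) > 1}
--
--     return result_dict
-- ===== SOURCE B (Python) =====
-- def find_duplicate_names(dictionary):
--     counts = {}
--     for key, value in dictionary.items():
--         for name in value: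
--             counts[name] = counts.get(name, 0) + 1
--     result = {}
--     for key, value in dictionary.items():
--         for name in value:
--             if counts[name] > 1:
--                 result.setdefault(name, []).append(key)
--     return result
-- ===== Notes on version B (the rewrite author's own statement) =====
-- stated objective: alternative
-- what changed: Instead of building full name-to-key lists and filtering them afterwards, B first counts occurrences of each name in one pass and then rebuilds only the lists of duplicated names in a second pass with setdefault.
import Mathlib
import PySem

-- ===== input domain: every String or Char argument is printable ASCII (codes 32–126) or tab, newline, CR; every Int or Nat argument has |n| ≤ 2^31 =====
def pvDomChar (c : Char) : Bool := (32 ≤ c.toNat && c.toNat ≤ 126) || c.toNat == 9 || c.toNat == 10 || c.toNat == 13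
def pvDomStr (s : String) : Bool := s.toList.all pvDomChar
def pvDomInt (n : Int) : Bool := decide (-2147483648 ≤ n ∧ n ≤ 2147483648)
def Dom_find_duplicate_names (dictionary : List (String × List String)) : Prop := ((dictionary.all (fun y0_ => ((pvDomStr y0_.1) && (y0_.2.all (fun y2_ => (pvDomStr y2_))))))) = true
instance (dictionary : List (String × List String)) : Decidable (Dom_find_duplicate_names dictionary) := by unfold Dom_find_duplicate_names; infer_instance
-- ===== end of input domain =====

-- B replaces A's build-all-lists-then-filter by a count pass followed by a rebuild
-- pass that materializes lists only for duplicated names (alternative decomposition).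

-- ===== PORT A =====
def find_duplicate_names (dictionary : List (String × List String)) : List (String × List String) :=
  let name_to_keys : PySem.Dict String (List String) :=
    dictionary.foldl (fun d kv =>
      kv.2.foldl (fun d name =>
        if d.contains name then d.modify name [] (fun l => l ++ [kv.1])
        else d.insert name [kv.1]) d)
      PySem.Dict.empty
  name_to_keys.items.filter (fun p => p.2.length > 1)

-- ===== PORT B =====
def find_duplicate_names_alt (dictionary : List (String × List String)) : List (String × List String) :=
  let counts : PySem.Dict String Int :=
    dictionary.foldl (fun c kv =>
      kv.2.foldl (fun c name => c.insert name (c.getD name 0 + 1)) c)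
      PySem.Dict.empty
  let result : PySem.Dict String (List String) :=
    dictionary.foldl (fun r kv =>
      kv.2.foldl (fun r name =>
        if counts.getD name 0 > 1 then
          (r.setdefault name []).modify name [] (fun l => l ++ [kv.1])
        else r) r)
      PySem.Dict.empty
  result.items

-- ===== PRECONDITION & SPEC =====
def Spec_find_duplicate_names (dictionary : List (String × List String)) (out : List (String × List String)) : Prop := out = find_duplicate_names_alt dictionary
instance (dictionary : List (String × List String)) (out : List (String × List String)) : Decidable (Spec_find_duplicate_names dictionary out) := by unfold Spec_find_duplicate_names; infer_instance

-- ===== CLAIM (what is proved, stated in full; the proofs are below) =====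
def Claim_equal_find_duplicate_names : Prop := ∀ (dictionary : List (String × List String)), Dom_find_duplicate_names dictionary → Spec_find_duplicate_names dictionary (find_duplicate_names dictionary)

-- ===== LEMMAS AND PROOFS =====

-- the (name, key) occurrence pairs, in traversal order
def pvPairs (dictionary : List (String × List String)) : List (String × String) :=
  dictionary.flatMap (fun kv => kv.2.map (fun n => (n, kv.1)))

-- each nested loop over the dictionary is the flat loop over the occurrence pairs
theorem pv_flatA (l : List (String × List String)) (init : PySem.Dict String (List String)) :
    l.foldl (fun d kv => kv.2.foldl (fun d name => d.modify name [] (fun s => s ++ [kv.1])) d) init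
      = (pvPairs l).foldl (fun d p => d.modify p.1 [] (fun s => s ++ [p.2])) init := by
  induction l generalizing init with
  | nil => rfl
  | cons kv rest ih =>
    simp [pvPairs, List.foldl_append, List.foldl_map] at *
    simp [ih]

theorem pv_flatC (l : List (String × List String)) (init : PySem.Dict String Int) :
    l.foldl (fun c kv => kv.2.foldl (fun c name => c.insert name (c.getD name 0 + 1)) c) init
      = (pvPairs l).foldl (fun c p => c.insert p.1 (c.getD p.1 0 + 1)) init := by
  induction l generalizing init with
  | nil => rfl
  | cons kv rest ih =>
    simp [pvPairs, List.foldl_append, List.foldl_map] at *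
    simp [ih]

theorem pv_flatR (C : PySem.Dict String Int) (l : List (String × List String))
    (init : PySem.Dict String (List String)) :
    l.foldl (fun r kv => kv.2.foldl (fun r name =>
        if C.getD name 0 > 1 then r.modify name [] (fun s => s ++ [kv.1]) else r) r) init
      = (pvPairs l).foldl (fun r p =>
          if C.getD p.1 0 > 1 then r.modify p.1 [] (fun s => s ++ [p.2]) else r) init := by
  induction l generalizing init with
  | nil => rfl
  | cons kv rest ih =>
    simp [pvPairs, List.foldl_append, List.foldl_map] at *
    simp [ih]

theorem pv_stepA_eq_modify (d : PySem.Dict String (List String)) (name key : String) :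
    (if d.contains name then d.modify name [] (fun l => l ++ [key])
     else d.insert name [key]) = d.modify name [] (fun l => l ++ [key]) := by
  by_cases h : d.contains name = true
  · simp [h]
  · simp [h, PySem.Dict.modify,
      PySem.Dict.getD_of_not_contains _ _ (by simpa using h)]

theorem pv_setdefault_modify (d : PySem.Dict String (List String)) (name key : String) :
    (d.setdefault name []).modify name [] (fun l => l ++ [key])
      = d.modify name [] (fun l => l ++ [key]) := by
  by_cases h : d.contains name = true
  · rw [PySem.Dict.setdefault_of_contains _ _ h]
  · rw [PySem.Dict.setdefault_of_not_contains _ _ (by simpa using h)]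
    simp [PySem.Dict.modify, PySem.Dict.getD_insert_self,
      PySem.Dict.getD_of_not_contains _ _ (by simpa using h),
      PySem.Dict.insert_insert_self]

theorem pv_ofList_filter (p : String → Bool) (xs : List String) :
    PySem.Set.ofList (xs.filter p) = (PySem.Set.ofList xs).filter p := by
  induction xs with
  | nil => rfl
  | cons x xs ih =>
    by_cases h : p x = true
    · simp [h, PySem.Set.ofList_cons, ih, PySem.Set.discard, List.filter_filter]
      congr 1; funext a; by_cases hx : a == x <;> simp_all [Bool.and_comm]
    · simp [h, PySem.Set.ofList_cons, ih, PySem.Set.discard, List.filter_filter]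
      apply List.filter_congr; intro a _
      by_cases hx : a == x
      · have : a = x := by simpa using hx
        subst this; simp_all
      · simp_all

-- count of name n among the occurrence pairs, as a Bool predicate "duplicated"
def pvDup (P : List (String × String)) (n : String) : Bool :=
  decide (1 < (P.map (fun p => p.1)).count n)

theorem pv_counts_getD (P : List (String × String)) (n : String) :
    (P.foldl (fun c p => c.insert p.1 (c.getD p.1 0 + 1)) (PySem.Dict.empty : PySem.Dict String Int)).getD n 0
      = ((P.map (fun p => p.1)).count n : Int) := by
  have h : ∀ (Q : List (String × String)) (init : PySem.Dict String Int),
      Q.foldl (fun c p => c.insert p.1 (c.getD p.1 0 + 1)) init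
        = (Q.map (fun p => p.1)).foldl (fun c x => c.insert x (c.getD x 0 + 1)) init := by
    intro Q
    induction Q with
    | nil => intro init; rfl
    | cons q rest ih => intro init; simp [ih]
  rw [h, PySem.Dict.getD_foldl_insert_add_one, PySem.Dict.getD_empty]
  simp

theorem pv_main (P : List (String × String)) :
    ((P.foldl (fun d p => d.modify p.1 [] (fun l => l ++ [p.2]))
        (PySem.Dict.empty : PySem.Dict String (List String))).items.filter
      (fun p => p.2.length > 1))
    = (P.foldl (fun r p =>
          if (P.foldl (fun c p => c.insert p.1 (c.getD p.1 0 + 1))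
                (PySem.Dict.empty : PySem.Dict String Int)).getD p.1 0 > 1
          then r.modify p.1 [] (fun l => l ++ [p.2]) else r)
        (PySem.Dict.empty : PySem.Dict String (List String))).items := by
  -- names in occurrence order, and the duplicated-name predicate
  have hq : ∀ p : String × String,
      decide ((P.foldl (fun c p => c.insert p.1 (c.getD p.1 0 + 1))
          (PySem.Dict.empty : PySem.Dict String Int)).getD p.1 0 > 1) = pvDup P p.1 := by
    intro p
    simp [pv_counts_getD P, pvDup, gt_iff_lt, Nat.one_lt_cast]
  rw [PySem.List.foldl_ite_eq_foldl_filter]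
  rw [List.filter_congr (fun p _ => hq p)]
  -- abbreviations
  set N : List String := P.map (fun p => p.1) with hN
  set Pf : List (String × String) := P.filter (fun p => pvDup P p.1) with hPf
  set dA : PySem.Dict String (List String) :=
    P.foldl (fun d p => d.modify p.1 [] (fun s => s ++ [p.2])) PySem.Dict.empty with hdA
  set dR : PySem.Dict String (List String) :=
    Pf.foldl (fun d p => d.modify p.1 [] (fun s => s ++ [p.2])) PySem.Dict.empty with hdR
  -- keys of the two builds
  have hndA : dA.keys.Nodup := by
    rw [hdA]
    exact PySem.Dict.nodup_keys_foldl_modify_key P (fun p => p.1) []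
      (fun d p => fun s => s ++ [p.2]) _ PySem.Dict.nodup_keys_empty
  have hndR : dR.keys.Nodup := by
    rw [hdR]
    exact PySem.Dict.nodup_keys_foldl_modify_key Pf (fun p => p.1) []
      (fun d p => fun s => s ++ [p.2]) _ PySem.Dict.nodup_keys_empty
  have hkA : dA.keys = PySem.Set.ofList N := by
    rw [hdA, PySem.Dict.keys_foldl_modify_key P (fun p => p.1) []
      (fun d p => fun s => s ++ [p.2])]
    rw [PySem.Dict.keys_empty, PySem.Set.update_nil_left]
  have hkR : dR.keys = PySem.Set.ofList (N.filter (pvDup P)) := by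
    rw [hdR, PySem.Dict.keys_foldl_modify_key Pf (fun p => p.1) []
      (fun d p => fun s => s ++ [p.2])]
    rw [PySem.Dict.keys_empty, PySem.Set.update_nil_left, hPf, hN, List.filter_map]
    rfl
  -- the stored lists
  have hgA : ∀ k, dA.getD k [] = (P.filter (fun p => p.1 == k)).map (fun p => p.2) := by
    intro k
    rw [hdA, PySem.Dict.getD_foldl_modify_append, PySem.Dict.getD_empty]
    simp
  have hgR : ∀ k, dR.getD k [] = (Pf.filter (fun p => p.1 == k)).map (fun p => p.2) := by
    intro k
    rw [hdR, PySem.Dict.getD_foldl_modify_append, PySem.Dict.getD_empty]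
    simp
  -- length of A's list at k is the occurrence count of k
  have hlen : ∀ k, (dA.getD k []).length = N.count k := by
    intro k
    rw [hgA, hN, List.count_eq_countP, List.countP_map]
    simp [List.countP_eq_length_filter]
    rfl
  -- on duplicated names the two builds store the same list
  have hagree : ∀ k, pvDup P k = true → dR.getD k [] = dA.getD k [] := by
    intro k hk
    rw [hgR, hgA, hPf, List.filter_filter]
    congr 1
    apply List.filter_congr
    intro p _
    by_cases hpk : p.1 == k
    · have : p.1 = k := by simpa using hpk
      simp [this, hk]
    · simp [hpk]
  -- assemble
  rw [PySem.Dict.items_eq_map_keys dA hndA [], PySem.Dict.items_eq_map_keys dR hndR []]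
  rw [List.filter_map, hkA, hkR]
  have hpred : ∀ k ∈ PySem.Set.ofList N,
      ((fun p : String × List String => decide (p.2.length > 1)) ∘ fun k => (k, dA.getD k [])) k
        = pvDup P k := by
    intro k _
    simp [Function.comp, pvDup, hlen k, hN]
  rw [List.filter_congr hpred, ← pv_ofList_filter]
  apply List.map_congr_left
  intro k hk
  have hk' : pvDup P k = true := by
    rw [PySem.Set.mem_ofList] at hk
    exact (List.mem_filter.mp hk).2
  rw [hagree k hk']

theorem find_duplicate_names_spec : Claim_equal_find_duplicate_names := by
  intro dictionary _
  unfold Spec_find_duplicate_names find_duplicate_names find_duplicate_names_alt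
  simp only [pv_stepA_eq_modify, pv_setdefault_modify]
  rw [pv_flatA, pv_flatC, pv_flatR]
  exact pv_main (pvPairs dictionary)
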